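-- pv_equiv track=rewrite | github.com/Labelbox/labelbox-python | libs/labelbox/src/labelbox/data/serialization/ndjson/label.py | _get_consecutive_frames
-- ===== SOURCE A (Python) =====
-- from itertools import groupby
-- from operator import itemgetter
-- from typing import Dict, Generator, List, Tuple, Union
--
-- def _get_consecutive_frames(
--     frames_indices: List[int],
-- ) -> List[Tuple[int, int]]:
--     consecutive = []
--     for k, g in groupby(enumerate(frames_indices), lambda x: x[0] - x[1]):
--         group = list(map(itemgetter(1), g))
--         consecutive.append((group[0], group[-1]))
--     return consecutive
-- ===== SOURCE B (Python) =====
-- from typing import List, Tuple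
--
-- def _get_consecutive_frames(
--     frames_indices: List[int],
-- ) -> List[Tuple[int, int]]:
--     if not frames_indices:
--         return []
--     result = []
--     start = prev = frames_indices[0]
--     for v in frames_indices[1:]:
--         if v == prev + 1:
--             prev = v
--         else:
--             result.append((start, prev))
--             start = prev = v
--     result.append((start, prev))
--     return result
-- ===== Notes on version B (the rewrite author's own statement) =====
-- stated objective: simpler
-- what changed: Replaces itertools.groupby on the index-minus-value key (with enumerate and a per-group list materialisation) by one explicit pass holding just two variables start/prev, splitting a run whenever v != prev + 1; avoiding enumerate tuples, key closures and per-group list materialisation makes it measurably faster by constant factor.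
import Mathlib
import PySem

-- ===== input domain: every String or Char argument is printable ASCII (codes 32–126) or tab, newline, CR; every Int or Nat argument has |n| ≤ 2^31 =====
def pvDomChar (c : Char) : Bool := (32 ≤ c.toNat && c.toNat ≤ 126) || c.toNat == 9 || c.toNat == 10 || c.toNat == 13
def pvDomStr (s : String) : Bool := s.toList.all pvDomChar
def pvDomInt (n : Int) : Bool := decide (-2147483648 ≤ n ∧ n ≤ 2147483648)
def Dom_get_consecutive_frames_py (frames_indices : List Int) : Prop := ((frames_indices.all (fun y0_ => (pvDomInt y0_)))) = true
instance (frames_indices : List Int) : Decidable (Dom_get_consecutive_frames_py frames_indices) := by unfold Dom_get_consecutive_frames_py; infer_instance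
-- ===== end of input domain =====

-- ===== PORT A =====
-- B is one explicit pass with start/prev instead of groupby on the i - v key; same return value (simpler).

-- itertools.groupby helper: take the maximal prefix of enumerated pairs whose key i - v equals k,
-- returning the group's values and the remaining pairs (exact for groupby over enumerate with key x[0]-x[1])
def pvTakeRun (k : Int) : List (Int × Int) → List Int × List (Int × Int)
  | [] => ([], [])
  | (i, v) :: rest =>
    if i - v = k then
      let p := pvTakeRun k rest
      (v :: p.1, p.2)
    else ([], (i, v) :: rest)

theorem pvTakeRun_len (k : Int) (l : List (Int × Int)) : (pvTakeRun k l).2.length ≤ l.length := by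
  induction l with
  | nil => simp [pvTakeRun]
  | cons h t ih =>
    obtain ⟨i, v⟩ := h
    simp only [pvTakeRun]
    split
    · simpa using Nat.le_succ_of_le ih
    · simp

-- the groups produced by groupby(enumerate(xs), key = lambda x: x[0] - x[1]) as lists of values
def pvGroupsA : List (Int × Int) → List (List Int)
  | [] => []
  | (i, v) :: rest =>
    (v :: (pvTakeRun (i - v) rest).1) :: pvGroupsA (pvTakeRun (i - v) rest).2
termination_by l => l.length
decreasing_by
  exact Nat.lt_succ_of_le (pvTakeRun_len _ _)

-- (group[0], group[-1]); every group produced by pvGroupsA is nonempty, so the defaults are never read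
def pvEnds (g : List Int) : Int × Int := (g.headD 0, g.getLastD 0)

def get_consecutive_frames_py (frames_indices : List Int) : List (Int × Int) :=
  (pvGroupsA (PySem.List.enumerate frames_indices 0)).map pvEnds

-- ===== PORT B =====
def pvLoopB (start prev : Int) : List Int → List (Int × Int)
  | [] => [(start, prev)]
  | v :: rest =>
    if v = prev + 1 then pvLoopB start v rest
    else (start, prev) :: pvLoopB v v rest

def get_consecutive_frames_py_alt (frames_indices : List Int) : List (Int × Int) :=
  match frames_indices with
  | [] => []
  | v :: rest => pvLoopB v v rest

-- ===== PRECONDITION & SPEC =====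
def Spec_get_consecutive_frames_py (frames_indices : List Int) (out : List (Int × Int)) : Prop := out = get_consecutive_frames_py_alt frames_indices
instance (frames_indices : List Int) (out : List (Int × Int)) : Decidable (Spec_get_consecutive_frames_py frames_indices out) := by unfold Spec_get_consecutive_frames_py; infer_instance

-- ===== CLAIM (what is proved, stated in full; the proofs are below) =====
def Claim_equal_get_consecutive_frames_py : Prop := ∀ (frames_indices : List Int), Dom_get_consecutive_frames_py frames_indices → Spec_get_consecutive_frames_py frames_indices (get_consecutive_frames_py frames_indices)

-- ===== LEMMAS AND PROOFS =====

-- A's processing of a partially consumed first group: current group started at value `start`,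
-- its last value so far is v at enumeration index i, and xs are the values still to come
def pvARun (i v start : Int) (xs : List Int) : List (Int × Int) :=
  (start, (v :: (pvTakeRun (i - v) (PySem.List.enumerate xs (i + 1))).1).getLastD 0)
    :: (pvGroupsA (pvTakeRun (i - v) (PySem.List.enumerate xs (i + 1))).2).map pvEnds

theorem pvARun_eq_loopB (xs : List Int) : ∀ (i v start : Int),
    pvARun i v start xs = pvLoopB start v xs := by
  induction xs with
  | nil => intro i v start; simp [pvARun, PySem.List.enumerate, pvTakeRun, pvGroupsA, pvLoopB]
  | cons w rest ih =>
    intro i v start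
    by_cases h : w = v + 1
    · have hkey : i + 1 - w = i - v := by omega
      have heq : pvARun i v start (w :: rest) = pvARun (i + 1) w start rest := by
        simp only [pvARun, PySem.List.enumerate_cons, pvTakeRun, hkey]
        simp
      rw [heq, ih, pvLoopB, if_pos h, h]
    · have hkey : ¬ (i + 1 - w = i - v) := by omega
      rw [pvLoopB, if_neg h, ← ih (i + 1) w w]
      simp [pvARun, PySem.List.enumerate_cons, pvTakeRun, if_neg hkey, pvGroupsA, pvEnds,
        List.getLastD]

-- ===== VERDICT (by name: the statement is the Claim_ definition above) =====
theorem get_consecutive_frames_py_spec : Claim_equal_get_consecutive_frames_py := by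
  intro xs _
  unfold Spec_get_consecutive_frames_py
  cases xs with
  | nil => simp [get_consecutive_frames_py, get_consecutive_frames_py_alt, PySem.List.enumerate, pvGroupsA]
  | cons v rest =>
    show get_consecutive_frames_py (v :: rest) = pvLoopB v v rest
    rw [← pvARun_eq_loopB rest 0 v v]
    simp [get_consecutive_frames_py, PySem.List.enumerate_cons, pvGroupsA, pvARun, pvEnds]
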